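-- pv_equiv track=rewrite | github.com/confettimimy/Python-for-coding-test | • 프로그래머스/해시/전화번호 목록(미해결).py | solution
-- ===== SOURCE A (Python) =====
-- def solution(phone_book):
--     answer = True
--
--     for i in phone_book: # 기준
--
--         for k in phone_book:
--             if i == k: # 자기 자신과인 경우는 패스
--                 continue
--             if i in k:
--                 answer = False
--
--     return answer
-- ===== SOURCE B (Python) =====
-- def solution(phone_book):
--     book = set(phone_book)
--     for num in phone_book:
--         L = len(num)
--         for a in range(L + 1):
--             for b in range(a, L + 1):
--                 sub = num[a:b]
--                 if sub != num and sub in book: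
--                     return False
--     return True
-- ===== Notes on version B (the rewrite author's own statement) =====
-- stated objective: faster
-- what changed: Instead of A's all-pairs scan testing every number for containment in every other number, B builds a set of the numbers once and for each number checks whether any of its own substrings (other than the number itself) is in that set.
import Mathlib
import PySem

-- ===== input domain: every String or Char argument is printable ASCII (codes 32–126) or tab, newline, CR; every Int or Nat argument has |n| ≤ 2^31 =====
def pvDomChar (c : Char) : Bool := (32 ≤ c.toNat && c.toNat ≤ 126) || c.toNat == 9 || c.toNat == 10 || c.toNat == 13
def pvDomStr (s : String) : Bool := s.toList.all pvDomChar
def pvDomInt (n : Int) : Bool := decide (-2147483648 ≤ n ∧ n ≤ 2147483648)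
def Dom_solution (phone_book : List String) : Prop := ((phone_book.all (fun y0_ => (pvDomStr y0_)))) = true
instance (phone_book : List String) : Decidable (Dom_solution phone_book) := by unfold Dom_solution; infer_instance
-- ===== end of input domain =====

-- B replaces A's all-pairs substring scan (O(n^2) string containment tests) by one set of the
-- numbers plus an enumeration of each number's own substrings, looked up in that set.

-- ===== PORT A =====
-- literal transliteration of A's nested for-loops with the 'answer' flag
def solution (phone_book : List String) : Bool :=
  phone_book.foldl (fun answer i =>
    phone_book.foldl (fun answer k =>
      if i == k then answer
      else if PySem.Str.isIn i k then false
      else answer) answer) true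

-- ===== PORT B =====
-- inner two loops of Source B: 'for a in range(L+1): for b in range(a, L+1): …return False' as an any
def solutionAltHit (book : PySem.Set String) (num : String) : Bool :=
  (List.range (num.toList.length + 1)).any (fun a =>
    (List.range' a (num.toList.length + 1 - a)).any (fun b =>
      let sub := PySem.Str.slice num (some (a : Int)) (some (b : Int))
      sub != num && PySem.Set.contains book sub))

def solution_alt (phone_book : List String) : Bool :=
  let book := PySem.Set.ofList phone_book
  !(phone_book.any (fun num => solutionAltHit book num))

-- ===== PRECONDITION & SPEC =====
def Spec_solution (phone_book : List String) (out : Bool) : Prop := out = solution_alt phone_book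
instance (phone_book : List String) (out : Bool) : Decidable (Spec_solution phone_book out) := by unfold Spec_solution; infer_instance

-- ===== CLAIM (what is proved, stated in full; the proofs are below) =====
def Claim_equal_solution : Prop := ∀ (phone_book : List String), Dom_solution phone_book → Spec_solution phone_book (solution phone_book)

-- ===== LEMMAS AND PROOFS =====

-- fold that can only keep the accumulator or set it to false
lemma foldl_set_false {α : Type} (l : List α) (p : α → Bool) (b : Bool) :
    l.foldl (fun a x => if p x then false else a) b = (b && !(l.any p)) := by
  induction l generalizing b with
  | nil => simp
  | cons x xs ih =>
    simp only [List.foldl_cons, List.any_cons, ih]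
    by_cases h : p x = true <;> simp [h]

lemma foldl_and {α : Type} (l : List α) (f : α → Bool) (b : Bool) :
    l.foldl (fun a x => a && f x) b = (b && l.all f) := by
  induction l generalizing b with
  | nil => simp
  | cons x xs ih => simp [List.foldl_cons, ih, Bool.and_assoc]

-- A computes the negation of "some i in pb is a substring of a different k in pb"
lemma solution_eq_any (pb : List String) :
    solution pb = !(pb.any (fun i => pb.any (fun k => !(i == k) && PySem.Str.isIn i k))) := by
  unfold solution
  have hbody : ∀ i : String,
      (fun (answer : Bool) (k : String) =>
        if i == k then answer else if PySem.Str.isIn i k then false else answer)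
      = (fun (answer : Bool) (k : String) =>
        if (!(i == k) && PySem.Str.isIn i k) then false else answer) := by
    intro i; funext a k
    by_cases h1 : i == k <;> by_cases h2 : PySem.Str.isIn i k <;> simp [h1]
  have h1 : ∀ (i : String) (a : Bool),
      pb.foldl (fun answer k =>
        if i == k then answer else if PySem.Str.isIn i k then false else answer) a
      = (a && !(pb.any (fun k => !(i == k) && PySem.Str.isIn i k))) := by
    intro i a; rw [hbody i]; exact foldl_set_false pb _ a
  calc pb.foldl (fun answer i => pb.foldl (fun answer k =>
          if i == k then answer else if PySem.Str.isIn i k then false else answer) answer) true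
      = pb.foldl (fun a i => a && !(pb.any (fun k => !(i == k) && PySem.Str.isIn i k))) true := by
        have hfn : (fun (answer : Bool) (i : String) => pb.foldl (fun answer k =>
            if i == k then answer else if PySem.Str.isIn i k then false else answer) answer)
            = (fun (a : Bool) (i : String) => a && !(pb.any (fun k => !(i == k) && PySem.Str.isIn i k))) := by
          funext a i; exact h1 i a
        rw [hfn]
    _ = !(pb.any (fun i => pb.any (fun k => !(i == k) && PySem.Str.isIn i k))) := by
        rw [foldl_and]; simp [List.all_eq_not_any_not]

-- a [drop/take] slice is an infix
lemma slice_isInfix {α : Type} (l : List α) (a n : Nat) : (l.drop a).take n <:+: l :=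
  ((l.drop a).take_prefix n).isInfix.trans (l.drop_suffix a).isInfix

-- any infix arises as a slice with bounds a ≤ b ≤ length
lemma infix_eq_slice {α : Type} {i l : List α} (h : i <:+: l) :
    ∃ a b : Nat, a ≤ b ∧ b ≤ l.length ∧ (l.drop a).take (b - a) = i := by
  obtain ⟨s, t, rfl⟩ := h
  refine ⟨s.length, s.length + i.length, by omega, by simp, ?_⟩
  simp

theorem solution_spec' (pb : List String) : solution pb = solution_alt pb := by
  rw [solution_eq_any]
  unfold solution_alt
  congr 1
  rw [Bool.eq_iff_iff]
  simp only [List.any_eq_true, Bool.and_eq_true, Bool.not_eq_eq_eq_not, Bool.not_true,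
    beq_eq_false_iff_ne, ne_eq]
  constructor
  · rintro ⟨i, hi, k, hk, hne, hin⟩
    have hinf : i.toList <:+: k.toList := (PySem.Str.isIn_iff_infix i k).mp hin
    obtain ⟨a, b, hab, hbL, hslice⟩ := infix_eq_slice hinf
    refine ⟨k, hk, ?_⟩
    unfold solutionAltHit
    simp only [List.any_eq_true, List.mem_range, List.mem_range']
    refine ⟨a, by omega, b, ?hb, ?_⟩
    case hb => exact ⟨b - a, by omega, by omega⟩
    have hsub : PySem.Str.slice k (some (a : Int)) (some (b : Int)) = i := by
      apply String.toList_inj.mp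
      rw [PySem.Str.toList_slice, PySem.Chars.slice_eq_listSlice, PySem.List.slice_natCast]
      exact hslice
    rw [hsub]
    simp only [Bool.and_eq_true, bne_iff_ne, ne_eq]
    exact ⟨hne, by simp [PySem.Set.mem_ofList]; exact hi⟩
  · rintro ⟨k, hk, hhit⟩
    unfold solutionAltHit at hhit
    simp only [List.any_eq_true, List.mem_range, List.mem_range', Bool.and_eq_true,
      bne_iff_ne, ne_eq] at hhit
    obtain ⟨a, _, b, _, hne, hmem⟩ := hhit
    set sub := PySem.Str.slice k (some (a : Int)) (some (b : Int)) with hsubdef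
    have hmem' : sub ∈ pb := by
      simpa [PySem.Set.contains_iff, PySem.Set.mem_ofList] using hmem
    refine ⟨sub, hmem', k, hk, fun h => hne h, ?_⟩
    rw [PySem.Str.isIn_iff_infix, hsubdef, PySem.Str.toList_slice,
      PySem.Chars.slice_eq_listSlice, PySem.List.slice_natCast]
    exact slice_isInfix _ _ _

-- ===== VERDICT (by name: the statement is the Claim_ definition above) =====
theorem solution_spec : Claim_equal_solution := by
  intro pb _
  exact solution_spec' pb
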